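-- pv_equiv track=rewrite | github.com/ffancer/study_with_codewars_part2 | 7 kyu Move all vowels.py | move_vowels
-- ===== SOURCE A (Python) =====
-- def move_vowels(input):
--     five_vowels = 'aeiou'
--     not_vowels, vowels = '', ''
--
--     for i in input:
--         if i in five_vowels:
--             vowels +=i
--         else:
--             not_vowels += i
--
--     return not_vowels + vowels
-- ===== SOURCE B (Python) =====
-- def move_vowels(input):
--     # Stable sort on a boolean key: non-vowels (False) keep their order ahead
--     # of vowels (True), which also keep theirs.
--     return ''.join(sorted(input, key=lambda c: c in 'aeiou'))
-- ===== Notes on version B (the rewrite author's own statement) =====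
-- stated objective: idiomatic
-- what changed: Replaces the explicit two-accumulator partition loop with a single stable sort keyed on vowel membership, joined back into a string.
import Mathlib
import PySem

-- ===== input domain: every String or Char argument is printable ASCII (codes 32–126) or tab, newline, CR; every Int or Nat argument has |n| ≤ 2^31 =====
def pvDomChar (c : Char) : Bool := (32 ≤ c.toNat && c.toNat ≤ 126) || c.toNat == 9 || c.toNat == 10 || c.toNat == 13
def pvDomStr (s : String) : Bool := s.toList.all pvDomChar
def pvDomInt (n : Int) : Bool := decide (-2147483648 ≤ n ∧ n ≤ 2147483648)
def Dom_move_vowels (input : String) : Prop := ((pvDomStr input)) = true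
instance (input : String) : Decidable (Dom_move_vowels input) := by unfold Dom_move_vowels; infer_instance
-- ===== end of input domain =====

-- B replaces A's two-accumulator partition loop with one stable sort on a boolean vowel key (idiomatic).

-- ===== PORT A =====
def move_vowels (input : String) : String :=
  let five_vowels : String := "aeiou"
  let r : List Char × List Char :=
    input.toList.foldl
      (fun (st : List Char × List Char) i =>
        if i ∈ five_vowels.toList then (st.1, st.2 ++ [i]) else (st.1 ++ [i], st.2))
      ([], [])
  String.mk (r.1 ++ r.2)

-- ===== PORT B =====
def move_vowels_alt (input : String) : String :=
  String.mk (PySem.List.sorted input.toList (fun c => decide (c ∈ ("aeiou" : String).toList)) false)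

-- ===== PRECONDITION & SPEC =====
def Spec_move_vowels (input : String) (out : String) : Prop := out = move_vowels_alt input
instance (input : String) (out : String) : Decidable (Spec_move_vowels input out) := by unfold Spec_move_vowels; infer_instance

-- ===== CLAIM (what is proved, stated in full; the proofs are below) =====
def Claim_equal_move_vowels : Prop := ∀ (input : String), Dom_move_vowels input → Spec_move_vowels input (move_vowels input)

-- ===== LEMMAS AND PROOFS =====

-- A's loop partitions: accumulators end as (nf ++ non-vowels of xs, vs ++ vowels of xs).
theorem mv_loopA (key : Char → Bool) (xs : List Char) (nf vs : List Char) :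
    xs.foldl (fun (st : List Char × List Char) i =>
        if key i then (st.1, st.2 ++ [i]) else (st.1 ++ [i], st.2)) (nf, vs)
      = (nf ++ xs.filter (fun c => !key c), vs ++ xs.filter key) := by
  induction xs generalizing nf vs with
  | nil => simp
  | cons x t ih =>
    by_cases h : key x = true <;> simp [List.foldl_cons, h, ih]

-- insertBy places x right before T when it is not-before every element of F but before T's head.
theorem mv_insertBy_mid (p : Char → Char → Bool) (x : Char) (F : List Char) (t : Char) (T : List Char)
    (hF : ∀ y ∈ F, p x y = false) (ht : p x t = true) :
    PySem.List.insertBy p x (F ++ t :: T) = F ++ x :: t :: T := by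
  induction F with
  | nil => simp [PySem.List.insertBy, ht]
  | cons f F' ih =>
    have hf : p x f = false := hF f (by simp)
    simp only [List.cons_append, PySem.List.insertBy, hf]
    simp [ih (fun y hy => hF y (by simp [hy]))]

-- Invariant of B's insertion sort with a boolean key: the accumulator stays
-- (all-false block) ++ (all-true block), and each insertion extends the right block.
theorem mv_loopB (key : Char → Bool) (xs : List Char) (F T : List Char)
    (hF : ∀ y ∈ F, key y = false) (hT : ∀ y ∈ T, key y = true) :
    xs.foldl (fun acc x => PySem.List.insertBy (fun a b => decide (key a < key b)) x acc) (F ++ T)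
      = (F ++ xs.filter (fun c => !key c)) ++ (T ++ xs.filter key) := by
  induction xs generalizing F T with
  | nil => simp
  | cons x t ih =>
    by_cases h : key x = true
    · have hall : ∀ y ∈ F ++ T, (fun a b => decide (key a < key b)) x y = false := by
        intro y _; cases hy : key y <;> simp [h, hy, Bool.lt_iff]
      rw [List.foldl_cons,
        PySem.List.insertBy_of_forall_not_before _ _ _ hall, List.append_assoc]
      have := ih F (T ++ [x]) hF (by intro y hy; rcases List.mem_append.1 hy with h' | h'
                                     · exact hT y h'
                                     · simp at h'; simpa [h'] using h)
      simpa [h, List.append_assoc] using this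
    · have hFx : ∀ y ∈ F, (fun a b => decide (key a < key b)) x y = false := by
        intro y hy; simp [hF y hy, h]
      rw [List.foldl_cons]
      have hx : key x = false := by simpa using h
      have hins : PySem.List.insertBy (fun a b => decide (key a < key b)) x (F ++ T)
          = (F ++ [x]) ++ T := by
        cases T with
        | nil =>
          simp only [List.append_nil]
          exact PySem.List.insertBy_of_forall_not_before _ x F hFx
        | cons u us =>
          have hu : (fun a b => decide (key a < key b)) x u = true := by
            have := hT u (by simp)
            simp [hx, this, Bool.lt_iff]
          rw [mv_insertBy_mid _ x F u us hFx hu]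
          simp
      rw [hins]
      have := ih (F ++ [x]) T (by intro y hy; rcases List.mem_append.1 hy with h' | h'
                                  · exact hF y h'
                                  · simp at h'; simpa [h'] using hx) hT
      simpa [h, List.append_assoc] using this

-- ===== VERDICT (by name: the statement is the Claim_ definition above) =====
theorem move_vowels_spec : Claim_equal_move_vowels := by
  unfold Claim_equal_move_vowels
  intro input _
  have hB := mv_loopB (fun c => decide (c ∈ ("aeiou" : String).toList)) input.toList [] []
      (by simp) (by simp)
  have hA := mv_loopA (fun c => decide (c ∈ ("aeiou" : String).toList)) input.toList [] []
  simp only [List.nil_append, List.append_nil] at hB hA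
  simp only [decide_eq_true_eq] at hA
  unfold Spec_move_vowels move_vowels move_vowels_alt
  rw [PySem.List.sorted_eq_foldl_insertBy, hB]
  simp only []
  rw [hA]
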